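-- pv_equiv track=rewrite | github.com/s26mehta/DataStructures | Interview_Questions/not_easy_questions.py | reduce_string_2
-- ===== SOURCE A (Python) =====
-- def reduce_string_2(input_str):
--   if len(input_str) < 2:
--     return input_str
--
--   cur_char = input_str[0]
--   appearances = 1
--   new_str = ""
--
--   idx = 1
--   while (idx < len(input_str)):
--     if input_str[idx] == cur_char:
--       appearances += 1
--     else:
--       if appearances >= 3:
--         return reduce_string_2(new_str + input_str[idx:])
--       else:
--         new_str += cur_char * appearances
--         cur_char = input_str[idx]
--         appearances = 1
--     idx += 1
--
--   return new_str if appearances >=3 else new_str + cur_char*appearances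
-- ===== SOURCE B (Python) =====
-- def reduce_string_2(input_str):
--     stack = []  # (char, run length), bottom -> top
--     for ch in input_str:
--         while True:
--             if stack and stack[-1][0] == ch:
--                 stack[-1] = (ch, stack[-1][1] + 1)
--                 break
--             elif stack and stack[-1][1] >= 3:
--                 stack.pop()  # completed run of >=3 vanishes; retry ch (may merge)
--             else:
--                 stack.append((ch, 1))
--                 break
--     if stack and stack[-1][1] >= 3:
--         stack.pop()
--     return "".join(c * k for c, k in stack)
-- ===== Notes on version B (the rewrite author's own statement) =====
-- stated objective: faster
-- what changed: Replaced A's scan-and-restart recursion (rescan the whole string after each removed run) by a single left-to-right pass over a stack of (char, run-length) pairs that pops runs of length >=3 and merges the neighbouring runs in place.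
import Mathlib
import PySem

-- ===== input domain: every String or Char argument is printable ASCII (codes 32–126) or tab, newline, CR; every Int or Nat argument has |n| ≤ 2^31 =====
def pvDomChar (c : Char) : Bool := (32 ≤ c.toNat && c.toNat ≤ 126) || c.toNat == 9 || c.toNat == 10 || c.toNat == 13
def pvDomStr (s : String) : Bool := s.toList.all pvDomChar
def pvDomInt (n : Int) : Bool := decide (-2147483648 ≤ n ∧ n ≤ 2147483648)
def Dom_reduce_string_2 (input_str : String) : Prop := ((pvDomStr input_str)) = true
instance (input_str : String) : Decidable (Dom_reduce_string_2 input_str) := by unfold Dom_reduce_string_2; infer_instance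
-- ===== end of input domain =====

-- B replaces A's scan-and-restart recursion by one left-to-right pass over a
-- stack of (char, run-length) pairs (different algorithm; same return value).

-- ===== PORT A =====
-- A's while loop: state (remaining suffix input_str[idx:], cur_char, appearances,
-- new_str); `.inl t` is the "return reduce_string_2(new_str + input_str[idx:])"
-- branch (t = that argument), `.inr r` is a normal return after the loop.
def stepA : List Char → Char → Nat → List Char → (List Char ⊕ List Char)
  | [], cur, app, acc => .inr (if 3 ≤ app then acc else acc ++ List.replicate app cur)
  | c :: rest, cur, app, acc =>
      if c = cur then stepA rest cur (app + 1) acc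
      else if 3 ≤ app then .inl (acc ++ (c :: rest))
      else stepA rest c 1 (acc ++ List.replicate app cur)

-- length accounting, used only for termination of reduceA
theorem stepA_inl_len : ∀ (rest : List Char) (cur : Char) (app : Nat) (acc : List Char)
    (t : List Char), stepA rest cur app acc = .inl t →
    t.length + 3 ≤ acc.length + app + rest.length := by
  intro rest
  induction rest with
  | nil => intro cur app acc t h; simp [stepA] at h
  | cons c rest ih =>
    intro cur app acc t h
    simp only [stepA] at h
    split_ifs at h with h1 h2
    · have := ih cur (app + 1) acc t h; simp at this ⊢; omega
    · cases h; simp; omega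
    · have := ih c 1 (acc ++ List.replicate app cur) t h; simp at this ⊢; omega

def reduceA : List Char → List Char
  | [] => []
  | [c] => [c]
  | c :: d :: tl =>
      match h : stepA (d :: tl) c 1 [] with
      | .inl t => reduceA t
      | .inr r => r
  termination_by l => l.length
  decreasing_by
    have := stepA_inl_len (d :: tl) c 1 [] t h
    simp at this ⊢; omega

def reduce_string_2 (input_str : String) : String :=
  String.mk (reduceA input_str.toList)

-- ===== PORT B =====
-- B's inner while loop: push ch onto the stack (head of the list = top of the
-- stack), first popping a top run of length ≥ 3 that a different char ends.
def pushB (st : List (Char × Nat)) (ch : Char) : List (Char × Nat) :=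
  match st with
  | (d, k) :: below =>
      if d = ch then (d, k + 1) :: below
      else if 3 ≤ k then pushB below ch
      else (ch, 1) :: (d, k) :: below
  | [] => [(ch, 1)]

-- B's final pop + "".join (the stack is top-first, so join its reverse)
def flushB (st : List (Char × Nat)) : List Char :=
  (match st with
   | (_, k) :: below => if 3 ≤ k then below else st
   | [] => []).reverse.flatMap (fun (p : Char × Nat) => List.replicate p.2 p.1)

def reduce_string_2_alt (input_str : String) : String :=
  String.mk (flushB (input_str.toList.foldl pushB []))

-- ===== PRECONDITION & SPEC =====
def Spec_reduce_string_2 (input_str : String) (out : String) : Prop := out = reduce_string_2_alt input_str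
instance (input_str : String) (out : String) : Decidable (Spec_reduce_string_2 input_str out) := by unfold Spec_reduce_string_2; infer_instance

-- ===== CLAIM (what is proved, stated in full; the proofs are below) =====
def Claim_equal_reduce_string_2 : Prop := ∀ (input_str : String), Dom_reduce_string_2 input_str → Spec_reduce_string_2 input_str (reduce_string_2 input_str)

-- ===== LEMMAS AND PROOFS =====

-- the string a (top-first) stack represents
def expandRev (st : List (Char × Nat)) : List Char :=
  st.reverse.flatMap (fun (p : Char × Nat) => List.replicate p.2 p.1)

theorem expandRev_cons (c : Char) (k : Nat) (st : List (Char × Nat)) :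
    expandRev ((c, k) :: st) = expandRev st ++ List.replicate k c := by
  simp [expandRev]

-- "fresh st cur": the stack top (if any) carries a char ≠ cur and a run < 3
def fresh (st : List (Char × Nat)) (cur : Char) : Prop :=
  ∀ d k below, st = (d, k) :: below → d ≠ cur ∧ k < 3

theorem pushB_fresh {st : List (Char × Nat)} {c : Char} (h : fresh st c) :
    pushB st c = (c, 1) :: st := by
  cases st with
  | nil => simp [pushB]
  | cons p below =>
    obtain ⟨d, k⟩ := p
    obtain ⟨hne, hk⟩ := h d k below rfl
    simp [pushB, hne, Nat.not_le.mpr hk]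

theorem foldl_replicate_same (c : Char) :
    ∀ (n k : Nat) (st : List (Char × Nat)),
    (List.replicate n c).foldl pushB ((c, k) :: st) = (c, k + n) :: st := by
  intro n
  induction n with
  | zero => simp
  | succ m ih =>
    intro k st
    rw [List.replicate_succ, List.foldl_cons]
    have : pushB ((c, k) :: st) c = (c, k + 1) :: st := by simp [pushB]
    rw [this, ih]
    have h2 : k + 1 + m = k + (m + 1) := by omega
    rw [h2]

theorem foldl_replicate_push {st : List (Char × Nat)} {cur : Char} (h : fresh st cur)
    {app : Nat} (happ : 1 ≤ app) :
    (List.replicate app cur).foldl pushB st = (cur, app) :: st := by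
  cases app with
  | zero => omega
  | succ n =>
    rw [List.replicate_succ, List.foldl_cons, pushB_fresh h, foldl_replicate_same,
      Nat.add_comm]

-- main loop invariant: the effect of A's loop, started in state
-- (rest, cur, app, expandRev st), seen through B's stack fold
theorem loop_inv : ∀ (rest : List Char) (cur : Char) (app : Nat) (st : List (Char × Nat)),
    1 ≤ app → fresh st cur → (expandRev st).foldl pushB [] = st →
    (∀ t, stepA rest cur app (expandRev st) = .inl t →
        t.foldl pushB [] = rest.foldl pushB ((cur, app) :: st)) ∧
    (∀ r, stepA rest cur app (expandRev st) = .inr r →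
        r = flushB (rest.foldl pushB ((cur, app) :: st))) := by
  intro rest
  induction rest with
  | nil =>
    intro cur app st happ hf hF
    constructor
    · intro t h; simp [stepA] at h
    · intro r h
      simp only [stepA, Sum.inr.injEq] at h
      subst h
      simp only [List.foldl_nil, flushB]
      split_ifs with h3
      · rfl
      · rw [← expandRev_cons]; rfl
  | cons c rest ih =>
    intro cur app st happ hf hF
    by_cases hc : c = cur
    · subst hc
      have key := ih c (app + 1) st (by omega) hf hF
      constructor
      · intro t h
        simp only [stepA, ↓reduceIte] at h
        rw [key.1 t h, List.foldl_cons]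
        have : pushB ((c, app) :: st) c = (c, app + 1) :: st := by simp [pushB]
        rw [this]
      · intro r h
        simp only [stepA, ↓reduceIte] at h
        rw [key.2 r h, List.foldl_cons]
        have : pushB ((c, app) :: st) c = (c, app + 1) :: st := by simp [pushB]
        rw [this]
    · by_cases h3 : 3 ≤ app
      · constructor
        · intro t h
          simp only [stepA, if_neg hc, if_pos h3, Sum.inl.injEq] at h
          subst h
          rw [List.foldl_append, hF, List.foldl_cons, List.foldl_cons]
          have hcc : cur ≠ c := fun e => hc e.symm
          have : pushB ((cur, app) :: st) c = pushB st c := by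
            simp [pushB, hcc, h3]
          rw [this]
        · intro r h
          simp [stepA, hc, h3] at h
      · -- switch to a new current run
        have hf' : fresh ((cur, app) :: st) c := by
          intro d k below hh
          cases hh
          exact ⟨fun hdc => hc hdc.symm, by omega⟩
        have hF' : (expandRev ((cur, app) :: st)).foldl pushB [] = (cur, app) :: st := by
          rw [expandRev_cons, List.foldl_append, hF, foldl_replicate_push hf happ]
        have key := ih c 1 ((cur, app) :: st) (by omega) hf' hF'
        have hstep : ∀ x, stepA (c :: rest) cur app x
            = stepA rest c 1 (x ++ List.replicate app cur) := by
          intro x; simp [stepA, hc, h3]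
        have hpush : pushB ((cur, app) :: st) c = (c, 1) :: (cur, app) :: st :=
          pushB_fresh hf'
        constructor
        · intro t h
          rw [hstep, ← expandRev_cons] at h
          rw [key.1 t h, List.foldl_cons, hpush]
        · intro r h
          rw [hstep, ← expandRev_cons] at h
          rw [key.2 r h, List.foldl_cons, hpush]

theorem reduceA_eq_stack : ∀ (n : Nat) (l : List Char), l.length ≤ n →
    reduceA l = flushB (l.foldl pushB []) := by
  intro n
  induction n with
  | zero =>
    intro l hl
    have : l = [] := List.eq_nil_of_length_eq_zero (by omega)
    subst this
    simp [reduceA, flushB]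
  | succ m ih =>
    intro l hl
    match l with
    | [] => simp [reduceA, flushB]
    | [c] =>
      simp [reduceA, flushB, pushB]
    | c :: d :: tl =>
      have hfresh : fresh ([] : List (Char × Nat)) c := by intro d k below h; cases h
      have hF : ((expandRev []).foldl pushB []) = ([] : List (Char × Nat)) := by
        simp [expandRev]
      have hacc : (expandRev ([] : List (Char × Nat))) = ([] : List Char) := by
        simp [expandRev]
      have key := loop_inv (d :: tl) c 1 [] (by omega) hfresh hF
      rw [hacc] at key
      rcases hs : stepA (d :: tl) c 1 [] with t | r
      · have hlen := stepA_inl_len (d :: tl) c 1 [] t hs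
        simp only [List.length_nil, List.length_cons] at hlen
        have h1 : reduceA (c :: d :: tl) = reduceA t := by
          rw [reduceA, hs]
        rw [h1, ih t (by simp at hl ⊢; omega), key.1 t hs]
        have : (c :: d :: tl).foldl pushB [] = (d :: tl).foldl pushB [(c, 1)] := by
          simp [pushB]
        rw [this]
      · have h1 : reduceA (c :: d :: tl) = r := by
          rw [reduceA, hs]
        rw [h1, key.2 r hs]
        have : (c :: d :: tl).foldl pushB [] = (d :: tl).foldl pushB [(c, 1)] := by
          simp [pushB]
        rw [this]

-- ===== VERDICT (by name: the statement is the Claim_ definition above) =====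
theorem reduce_string_2_spec : Claim_equal_reduce_string_2 := by
  intro s _
  unfold Spec_reduce_string_2 reduce_string_2 reduce_string_2_alt
  rw [reduceA_eq_stack s.toList.length s.toList le_rfl]
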